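-- pv_equiv track=rewrite | github.com/pai10464/python | moredc/moredc_34.py | pattern6
-- ===== SOURCE A (Python) =====
-- def pattern6(N):
--     ans = [[1]]
--     i = 2
--     if N == 0:
--         return []
--     for e in range(N - 1):
--         ans.append([0])
--     for e in range(N - 1):
--         for j in range(N - 1, e + 1, -1):
--             ans[j].append(0)
--         ans[e + 1].append(i)
--         i += 1
--     for e in range(N - 1):
--         if e % 2 != 0:
--         # down
--             for j in range(N - 1 - e):
--                 ans[j].append(i)
--                 i += 1
--         elif e % 2 == 0:
--         # up
--             for j in range(N - 2 - e, -1, -1):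
--                 ans[j].append(i)
--                 i += 1
--     return ans
-- ===== SOURCE B (Python) =====
-- def pattern6(N):
--     if N <= 0:
--         return []
--     M = [[0] * N for _ in range(N)]
--     val = 1
--     for r in range(N):
--         M[r][r] = val
--         val += 1
--     for k in range(1, N):
--         rows = range(N - k - 1, -1, -1) if k % 2 == 1 else range(N - k)
--         for r in rows:
--             M[r][r + k] = val
--             val += 1
--     return M
-- ===== Notes on version B (the rewrite author's own statement) =====
-- stated objective: simpler
-- what changed: B preallocates an N x N zero matrix and fills it by direct index assignment along the diagonals (main diagonal top-down, then each offset-k diagonal, alternating direction by parity of k), instead of A's append-based construction that grows ragged rows with separate zero-padding loops per column.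
-- intended difference: For N < 0 A returns [[1]] (the seed row its append-based construction starts from, left untouched because all loops are empty), while B returns [], the intended empty matrix for a negative size. — e.g. on pattern6(-1): A returns [[1]], B returns []
import Mathlib
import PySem

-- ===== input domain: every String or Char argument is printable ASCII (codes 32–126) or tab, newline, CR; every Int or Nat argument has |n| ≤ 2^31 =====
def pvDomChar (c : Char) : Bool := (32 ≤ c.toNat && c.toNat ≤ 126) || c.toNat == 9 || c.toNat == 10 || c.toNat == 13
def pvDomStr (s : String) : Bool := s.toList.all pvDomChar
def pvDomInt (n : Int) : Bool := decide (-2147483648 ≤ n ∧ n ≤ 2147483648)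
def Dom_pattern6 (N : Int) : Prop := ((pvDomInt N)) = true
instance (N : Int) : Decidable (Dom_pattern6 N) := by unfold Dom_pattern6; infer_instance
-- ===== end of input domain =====

-- B fills a preallocated N×N zero matrix by index assignment along the diagonals instead of
-- growing ragged rows by appends (simpler decomposition); for N < 0, B returns [] where A
-- returns [[1]] (stated as the intended difference D_pattern6).


-- ===== PORT A =====
-- ans[j].append(x): j is a nonnegative in-range index at every use site, where pySetD/pyGetD are exact
def pvAppendAt (a : List (List Int)) (j : Int) (x : Int) : List (List Int) :=
  PySem.List.pySetD a j (PySem.List.pyGetD a j [] ++ [x])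

def pattern6 (N : Int) : List (List Int) :=
  let ans : List (List Int) := [[1]]
  let i : Int := 2
  if N = 0 then [] else
  let ans := (PySem.List.pyRange 0 (N-1) 1).foldl (fun a _ => a ++ [[0]]) ans
  let s := (PySem.List.pyRange 0 (N-1) 1).foldl
    (fun (s : List (List Int) × Int) e =>
      (pvAppendAt ((PySem.List.pyRange (N-1) (e+1) (-1)).foldl (fun a j => pvAppendAt a j 0) s.1)
        (e+1) s.2, s.2 + 1)) (ans, i)
  let s := (PySem.List.pyRange 0 (N-1) 1).foldl
    (fun (s : List (List Int) × Int) e =>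
      if PySem.Int.mod e 2 ≠ 0 then
        (PySem.List.pyRange 0 (N-1-e) 1).foldl (fun s j => (pvAppendAt s.1 j s.2, s.2 + 1)) s
      else
        (PySem.List.pyRange (N-2-e) (-1) (-1)).foldl (fun s j => (pvAppendAt s.1 j s.2, s.2 + 1)) s) s
  s.1

-- ===== PORT B =====
-- M[r][c] = v: r and c are nonnegative in-range indices at every use site, where pySetD/pyGetD are exact
def pvSetCell (M : List (List Int)) (r c v : Int) : List (List Int) :=
  PySem.List.pySetD M r (PySem.List.pySetD (PySem.List.pyGetD M r []) c v)

def pattern6_alt (N : Int) : List (List Int) :=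
  if N ≤ 0 then [] else
  let M : List (List Int) := (PySem.List.pyRange 0 N 1).map (fun _ => PySem.List.pyRepeat [(0:Int)] N)
  let s := (PySem.List.pyRange 0 N 1).foldl
    (fun (s : List (List Int) × Int) r => (pvSetCell s.1 r r s.2, s.2 + 1)) (M, 1)
  let s := (PySem.List.pyRange 1 N 1).foldl
    (fun (s : List (List Int) × Int) k =>
      (if PySem.Int.mod k 2 = 1 then PySem.List.pyRange (N-k-1) (-1) (-1)
       else PySem.List.pyRange 0 (N-k) 1).foldl
        (fun s r => (pvSetCell s.1 r (r+k) s.2, s.2 + 1)) s) s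
  s.1

-- ===== PRECONDITION & SPEC =====
-- For N < 0 A returns [[1]] (the seed row its append-based construction starts from, left
-- untouched because all loops are empty), while B returns [], the intended empty matrix for a
-- negative size.
def D_pattern6 (N : Int) : Prop := N < 0
instance (N : Int) : Decidable (D_pattern6 N) := by unfold D_pattern6; infer_instance

def Spec_pattern6 (N : Int) (out : List (List Int)) : Prop := ¬ D_pattern6 N → out = pattern6_alt N
instance (N : Int) (out : List (List Int)) : Decidable (Spec_pattern6 N out) := by unfold Spec_pattern6; infer_instance

def pvDiffWitness_pattern6 : Int := (-1)
def pvDiffWitnessOut_pattern6 : (List (List Int)) × (List (List Int)) := ([[1]], [])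

-- ===== CLAIM (what is proved, stated in full; the proofs are below) =====
def Claim_unchanged_pattern6 : Prop := ∀ (N : Int), Dom_pattern6 N → Spec_pattern6 N (pattern6 N)
def Claim_changed_pattern6 : Prop := Dom_pattern6 (pvDiffWitness_pattern6) ∧ D_pattern6 (pvDiffWitness_pattern6) ∧ pattern6 (pvDiffWitness_pattern6) = pvDiffWitnessOut_pattern6.1 ∧ pattern6_alt (pvDiffWitness_pattern6) = pvDiffWitnessOut_pattern6.2 ∧ pvDiffWitnessOut_pattern6.1 ≠ pvDiffWitnessOut_pattern6.2
def Claim_exact_pattern6 : Prop := ∀ (N : Int), Dom_pattern6 N → D_pattern6 N → pattern6 N ≠ pattern6_alt N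

-- ===== LEMMAS AND PROOFS =====

-- row r of A's matrix after its second loop: r zeros then the diagonal value r+1
def pvRowA (r : Nat) : List Int := List.replicate r 0 ++ [(r:Int)+1]

-- pad a row with zeros on the right to length n (B keeps rows at full length n throughout)
def pvPad (n : Nat) (xs : List Int) : List Int := xs ++ List.replicate (n - xs.length) 0

theorem pvPad_full (n : Nat) (xs : List Int) (h : xs.length = n) : pvPad n xs = xs := by
  simp [pvPad, h]

-- writing into the first padding slot of a padded row = padding the row with the value appended
theorem pvPad_set (n : Nat) (xs : List Int) (i : Int) (h : xs.length < n) :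
    (pvPad n xs).set xs.length i = pvPad n (xs ++ [i]) := by
  unfold pvPad
  have h1 : n - xs.length = (n - xs.length - 1) + 1 := by omega
  rw [h1, List.replicate_succ, List.set_append_right _ _ (le_refl _)]
  simp
  omega

theorem pvSet_map_range {α : Type} (n m : Nat) (f : Nat → α) (x : α) :
    ((List.range n).map f).set m x
      = (List.range n).map (fun r => if r = m then x else f r) := by
  apply List.ext_getElem
  · simp
  · intro r h1 h2
    simp only [List.getElem_set, List.getElem_map, List.getElem_range]
    by_cases hr : r = m
    · simp [hr]
    · simp [hr]
      intro h
      exact absurd h.symm hr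

theorem pvGetD_map_range (n : Nat) (f : Nat → List Int) (j : Int) (h0 : 0 ≤ j)
    (hj : j < (n:Int)) :
    PySem.List.pyGetD ((List.range n).map f) j [] = f j.toNat := by
  rw [PySem.List.pyGetD_of_nonneg _ _ h0]
  have hjn : j.toNat < n := by omega
  simp [List.getD, hjn]

theorem pvAppendAt_map_range (n : Nat) (f : Nat → List Int) (j : Int) (x : Int)
    (h0 : 0 ≤ j) (hj : j < (n:Int)) :
    pvAppendAt ((List.range n).map f) j x
      = (List.range n).map (fun r => if r = j.toNat then f r ++ [x] else f r) := by
  rw [pvAppendAt, pvGetD_map_range n f j h0 hj,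
    PySem.List.pySetD_of_nonneg _ _ h0, pvSet_map_range]
  apply List.map_congr_left
  intro r _
  by_cases h1 : r = j.toNat <;> simp [h1]

theorem pvSetCell_map_range (n : Nat) (f : Nat → List Int) (j c x : Int)
    (h0 : 0 ≤ j) (hj : j < (n:Int)) (hc : 0 ≤ c) :
    pvSetCell ((List.range n).map f) j c x
      = (List.range n).map (fun r => if r = j.toNat then (f r).set c.toNat x else f r) := by
  rw [pvSetCell, pvGetD_map_range n f j h0 hj,
    PySem.List.pySetD_of_nonneg _ _ hc, PySem.List.pySetD_of_nonneg _ _ h0,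
    pvSet_map_range]
  apply List.map_congr_left
  intro r _
  by_cases h1 : r = j.toNat <;> simp [h1]

-- folding ans[j].append(v) over a nodup list of in-range indices appends v to exactly those rows
theorem pvFoldAppend (J : List Int) (hnd : J.Nodup) (n : Nat) (v : Int)
    (hJ : ∀ j ∈ J, 0 ≤ j ∧ j < (n:Int)) (f : Nat → List Int) :
    J.foldl (fun a j => pvAppendAt a j v) ((List.range n).map f)
      = (List.range n).map (fun (r : Nat) => if (r:Int) ∈ J then f r ++ [v] else f r) := by
  induction J generalizing f with
  | nil => simp
  | cons j J' ih =>
    obtain ⟨hj0, hjn⟩ := hJ j (by simp)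
    rw [List.foldl_cons, pvAppendAt_map_range n f j v hj0 hjn,
      ih (List.nodup_cons.mp hnd).2 (fun x hx => hJ x (by simp [hx]))]
    apply List.map_congr_left
    intro r _
    by_cases h1 : r = j.toNat
    · have hrj : (r:Int) = j := by omega
      have hmem : (r:Int) ∉ J' := hrj ▸ (List.nodup_cons.mp hnd).1
      have hmem2 : (r:Int) ∈ j :: J' := by simp [hrj]
      rw [if_neg hmem, if_pos h1, if_pos hmem2]
    · have h2 : ¬ ((r:Int) = j) := by omega
      have hmm : ((r:Int) ∈ j :: J') ↔ ((r:Int) ∈ J') := by simp [h2]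
      simp only [if_neg h1, hmm]

-- the core simulation: A appends the counter to row j, B writes it at column j+k of row j;
-- over one diagonal the two folds keep B's matrix equal to A's matrix padded to width n,
-- and keep the counters equal.
theorem pvFoldDiag (J : List Int) (hnd : J.Nodup) (n k : Nat) (i : Int)
    (f : Nat → List Int)
    (hJ : ∀ j ∈ J, 0 ≤ j ∧ j + (k:Int) < (n:Int))
    (hlenJ : ∀ j ∈ J, (f j.toNat).length = j.toNat + k) :
    ∃ f' : Nat → List Int,
      J.foldl (fun s j => (pvAppendAt s.1 j s.2, s.2 + 1)) (((List.range n).map f), i)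
        = ((List.range n).map f', i + J.length) ∧
      J.foldl (fun s j => (pvSetCell s.1 j (j + (k:Int)) s.2, s.2 + 1))
          (((List.range n).map (fun r => pvPad n (f r))), i)
        = ((List.range n).map (fun r => pvPad n (f' r)), i + J.length) ∧
      (∀ r : Nat, (f' r).length = (f r).length + (if (r:Int) ∈ J then 1 else 0)) := by
  induction J generalizing f i with
  | nil => exact ⟨f, by simp, by simp, by simp⟩
  | cons j J' ih =>
    obtain ⟨hj0, hjk⟩ := hJ j (by simp)
    have hjn : j < (n:Int) := by omega
    have hlj : (f j.toNat).length = j.toNat + k := hlenJ j (by simp)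
    have hjJ' : j ∉ J' := (List.nodup_cons.mp hnd).1
    set g : Nat → List Int := fun r => if r = j.toNat then f r ++ [i] else f r with hg
    have hA1 : pvAppendAt ((List.range n).map f) j i = (List.range n).map g :=
      pvAppendAt_map_range n f j i hj0 hjn
    have hB1 : pvSetCell ((List.range n).map (fun r => pvPad n (f r))) j (j + (k:Int)) i
        = (List.range n).map (fun r => pvPad n (g r)) := by
      rw [pvSetCell_map_range n _ j (j + (k:Int)) i hj0 hjn (by omega)]
      apply List.map_congr_left
      intro r _
      by_cases h1 : r = j.toNat
      · simp only [h1]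
        have hgj : g j.toNat = f j.toNat ++ [i] := by simp [hg]
        rw [hgj]
        have hidx : (j + (k:Int)).toNat = (f j.toNat).length := by omega
        rw [hidx]
        exact pvPad_set n _ i (by omega)
      · have hgr : g r = f r := by simp [hg, h1]
        simp [h1, hgr]
    have hstep : ∀ x ∈ J', 0 ≤ x ∧ x + (k:Int) < (n:Int) := fun x hx => hJ x (by simp [hx])
    have hlen' : ∀ x ∈ J', (g x.toNat).length = x.toNat + k := by
      intro x hx
      have hx0 := (hstep x hx).1
      have hxj : x ≠ j := fun hh => hjJ' (hh ▸ hx)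
      have hne : ¬ (x.toNat = j.toNat) := by omega
      simp only [hg, if_neg hne]
      exact hlenJ x (by simp [hx])
    obtain ⟨f', hA, hB, hlenf⟩ := ih (List.nodup_cons.mp hnd).2 (i + 1) g hstep hlen'
    refine ⟨f', ?_, ?_, ?_⟩
    · rw [List.foldl_cons]
      simp only [hA1]
      rw [hA]
      simp
      omega
    · rw [List.foldl_cons]
      simp only [hB1]
      rw [hB]
      simp
      omega
    · intro r
      have hlr := hlenf r
      by_cases h1 : (r:Int) = j
      · have hrj : r = j.toNat := by omega
        have hmem : (r:Int) ∉ J' := h1 ▸ hjJ'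
        have hgr : (g r).length = (f r).length + 1 := by simp [hg, hrj]
        rw [hgr, if_neg hmem] at hlr
        have hmem2 : (r:Int) ∈ j :: J' := by simp [h1]
        rw [hlr, if_pos hmem2]
      · have hgr : g r = f r := by
          simp [hg]
          intro hh
          omega
        rw [hgr] at hlr
        rw [hlr]
        simp [List.mem_cons, h1]

-- A's first loop: append N-1 rows [0] after the seed row [[1]]
theorem pvPhase1 (m : Int) :
    (PySem.List.pyRange 0 m 1).foldl (fun (a : List (List Int)) _ => a ++ [[0]]) [[1]]
      = [[1]] ++ List.replicate m.toNat [0] := by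
  rw [PySem.List.pyRange_one]
  have key : ∀ (L : List Int) (a : List (List Int)),
      L.foldl (fun a _ => a ++ [[0]]) a = a ++ List.replicate L.length [0] := by
    intro L
    induction L with
    | nil => simp
    | cons x t ih => intro a; simp [ih, List.replicate_succ, List.append_assoc]
  rw [key]
  simp

-- the initial matrix [[1],[0],…,[0]] as a map over row indices
theorem pvInit1 (n : Nat) (hn : 0 < n) :
    ([[ (1:Int) ]] ++ List.replicate (n-1) [0])
      = (List.range n).map (fun r => if r ≤ 0 then pvRowA r else List.replicate 1 0) := by
  apply List.ext_getElem
  · simp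
    omega
  · intro r h1 h2
    simp only [List.getElem_map, List.getElem_range]
    rcases Nat.eq_zero_or_pos r with hr | hr
    · subst hr
      simp [pvRowA]
    · have hr1 : ¬ (r ≤ 0) := by omega
      have hlt : ¬ (r < ([[ (1:Int) ]] : List (List Int)).length) := by simp; omega
      rw [List.getElem_append_right (by simp; omega)]
      simp [hr1]

-- A's second loop, partial: after t iterations rows 0..t are finished, the rest hold t+1 zeros
theorem pvPhase2 (n : Nat) (hn : 0 < n) (t : Nat) (ht : t ≤ n - 1) :
    (PySem.List.pyRange 0 (t:Int) 1).foldl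
      (fun (s : List (List Int) × Int) e =>
        (pvAppendAt ((PySem.List.pyRange ((n:Int)-1) (e+1) (-1)).foldl (fun a j => pvAppendAt a j 0) s.1)
          (e+1) s.2, s.2 + 1))
      ((List.range n).map (fun r => if r ≤ 0 then pvRowA r else List.replicate 1 0), 2)
    = ((List.range n).map (fun r => if r ≤ t then pvRowA r else List.replicate (t+1) 0), 2 + (t:Int)) := by
  induction t with
  | zero => simp
  | succ t ih =>
    have ht' : t ≤ n - 1 := by omega
    have hcast : ((t:Int)) + 1 = ((t+1 : Nat) : Int) := by push_cast; ring
    rw [← hcast, PySem.List.pyRange_one_succ_right (by omega), List.foldl_append, ih ht']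
    simp only [List.foldl_cons, List.foldl_nil]
    rw [pvFoldAppend _ (by
        rw [PySem.List.pyRange_neg_one_eq_reverse]
        exact List.nodup_reverse.mpr (PySem.List.nodup_pyRange_one _ _)) n 0
      (by intro j hj
          rw [PySem.List.mem_pyRange_neg_one] at hj
          omega)]
    rw [pvAppendAt_map_range n _ ((t:Int)+1) (2 + (t:Int)) (by omega) (by omega)]
    rw [Prod.mk.injEq]
    constructor
    · apply List.map_congr_left
      intro r hr
      simp only [List.mem_range] at hr
      have hrt : ((t:Int) + 1).toNat = t + 1 := by omega
      by_cases h1 : r = t + 1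
      · have hmem : ¬ ((r:Int) ∈ PySem.List.pyRange ((n:Int)-1) ((t:Int)+1) (-1)) := by
          rw [PySem.List.mem_pyRange_neg_one]; omega
        have h2 : ¬ (r ≤ t) := by omega
        simp [hrt, h1, pvRowA]
        ring
      · by_cases h2 : r ≤ t
        · have hmem : ¬ ((r:Int) ∈ PySem.List.pyRange ((n:Int)-1) ((t:Int)+1) (-1)) := by
            rw [PySem.List.mem_pyRange_neg_one]; omega
          simp [hrt, h1, h2, hmem, Nat.le_succ_of_le h2]
        · have hmem : (r:Int) ∈ PySem.List.pyRange ((n:Int)-1) ((t:Int)+1) (-1) := by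
            rw [PySem.List.mem_pyRange_neg_one]; omega
          have h3 : ¬ (r ≤ t + 1) := by omega
          simp [hrt, h1, h2, h3, hmem, List.replicate_succ']
    · ring

-- B's first loop, partial: after t iterations the first t diagonal cells hold 1..t
theorem pvBDiag (n : Nat) (t : Nat) (ht : t ≤ n) :
    (PySem.List.pyRange 0 (t:Int) 1).foldl
      (fun (s : List (List Int) × Int) r => (pvSetCell s.1 r r s.2, s.2 + 1))
      ((List.range n).map (fun _ => List.replicate n (0:Int)), 1)
    = ((List.range n).map (fun r => if r < t then pvPad n (pvRowA r) else List.replicate n 0),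
        1 + (t:Int)) := by
  induction t with
  | zero => simp
  | succ t ih =>
    have hcast : ((t:Int)) + 1 = ((t+1 : Nat) : Int) := by push_cast; ring
    rw [← hcast, PySem.List.pyRange_one_succ_right (by omega), List.foldl_append, ih (by omega)]
    simp only [List.foldl_cons, List.foldl_nil]
    rw [pvSetCell_map_range n _ (t:Int) (t:Int) (1+(t:Int)) (by omega) (by omega) (by omega)]
    rw [Prod.mk.injEq]
    constructor
    · apply List.map_congr_left
      intro r hr
      simp only [List.mem_range] at hr
      have hrt : ((t:Int)).toNat = t := by omega
      by_cases h1 : r = t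
      · have h2 : ¬ (t < t) := by omega
        have hrow : List.replicate n (0:Int) = pvPad n (List.replicate t (0:Int)) := by
          simp [pvPad, List.replicate_append_replicate]
          omega
        have hlen : (List.replicate t (0:Int)).length = t := by simp
        have hset : (pvPad n (List.replicate t (0:Int))).set t (1+(t:Int))
            = pvPad n (List.replicate t (0:Int) ++ [1+(t:Int)]) := by
          have := pvPad_set n (List.replicate t (0:Int)) (1+(t:Int)) (by simp; omega)
          rwa [hlen] at this
        have hrowA : List.replicate t (0:Int) ++ [1+(t:Int)] = pvRowA t := by
          simp [pvRowA]
          ring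
        simp only [h1, hrt, if_neg h2, if_pos (Nat.lt_succ_self t)]
        rw [hrow, hset, hrowA]
        simp
      · have hne : ¬ (r = t) := h1
        rcases Nat.lt_or_ge r t with h2 | h2
        · simp [hrt, hne, h2, Nat.lt_succ_of_lt h2]
        · have h3 : ¬ (r < t) := by omega
          have h4 : ¬ (r < t + 1) := by omega
          simp [hrt, hne, h3, h4]
    · ring

-- the third loops of A and B process the same diagonals with the same index lists and equal
-- counters; B's matrix stays A's matrix padded to width n
theorem pvPhase3 (n : Nat) (hn : 0 < n) (t : Nat) (ht : t ≤ n - 1) :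
    ∃ (f : Nat → List Int) (c : Int),
      (PySem.List.pyRange 0 (t:Int) 1).foldl
        (fun (s : List (List Int) × Int) e =>
          if PySem.Int.mod e 2 ≠ 0 then
            (PySem.List.pyRange 0 ((n:Int)-1-e) 1).foldl (fun s j => (pvAppendAt s.1 j s.2, s.2 + 1)) s
          else
            (PySem.List.pyRange ((n:Int)-2-e) (-1) (-1)).foldl (fun s j => (pvAppendAt s.1 j s.2, s.2 + 1)) s)
        ((List.range n).map pvRowA, (n:Int) + 1)
      = ((List.range n).map f, c) ∧
      (PySem.List.pyRange 1 ((t:Int)+1) 1).foldl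
        (fun (s : List (List Int) × Int) k =>
          (if PySem.Int.mod k 2 = 1 then PySem.List.pyRange ((n:Int)-k-1) (-1) (-1)
           else PySem.List.pyRange 0 ((n:Int)-k) 1).foldl
            (fun s r => (pvSetCell s.1 r (r+k) s.2, s.2 + 1)) s)
        ((List.range n).map (fun r => pvPad n (pvRowA r)), (n:Int) + 1)
      = ((List.range n).map (fun r => pvPad n (f r)), c) ∧
      (∀ r : Nat, r < n → (f r).length = min (r + t + 1) n) := by
  induction t with
  | zero =>
    refine ⟨pvRowA, (n:Int) + 1, by simp, by simp, ?_⟩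
    intro r hr
    simp [pvRowA]
    omega
  | succ t ih =>
    obtain ⟨f, c, hA, hB, hlen⟩ := ih (by omega)
    have hcast : ((t:Int)) + 1 = ((t+1 : Nat) : Int) := by push_cast; ring
    rw [← hcast, PySem.List.pyRange_one_succ_right (a := 0) (by omega), List.foldl_append, hA]
    rw [show ((t:Int)) + 1 + 1 = ((t:Int)+1) + 1 by ring,
      PySem.List.pyRange_one_succ_right (a := 1) (by omega), List.foldl_append, hB]
    simp only [List.foldl_cons, List.foldl_nil]
    -- the per-diagonal index list: the same for A (at e = t) and B (at k = t+1)
    have hJlem : ∀ r : Nat, r < n →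
        (((r:Int) ∈ (if PySem.Int.mod ((t:Int)+1) 2 = 1 then PySem.List.pyRange ((n:Int)-((t:Int)+1)-1) (-1) (-1)
           else PySem.List.pyRange 0 ((n:Int)-((t:Int)+1)) 1)) ↔ ((r:Int) ≤ (n:Int)-((t:Int)+1)-1)) := by
      intro r hr
      split
      · rw [PySem.List.mem_pyRange_neg_one]; omega
      · rw [PySem.List.mem_pyRange_one]; omega
    have hbranch :
        (if PySem.Int.mod ((t:Int)) 2 ≠ 0 then
            (PySem.List.pyRange 0 ((n:Int)-1-(t:Int)) 1)
          else (PySem.List.pyRange ((n:Int)-2-(t:Int)) (-1) (-1)))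
        = (if PySem.Int.mod ((t:Int)+1) 2 = 1 then PySem.List.pyRange ((n:Int)-((t:Int)+1)-1) (-1) (-1)
           else PySem.List.pyRange 0 ((n:Int)-((t:Int)+1)) 1) := by
      have h2 : (0:Int) < 2 := by omega
      rw [PySem.Int.mod_eq_emod_of_pos h2, PySem.Int.mod_eq_emod_of_pos h2]
      rcases Int.emod_two_eq ((t:Int)) with h | h
      · have h' : ((t:Int)+1) % 2 = 1 := by omega
        simp [h, h']
        congr 1
        ring
      · have h' : ¬ (((t:Int)+1) % 2 = 1) := by omega
        simp [h, h']
        congr 1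
        ring
    set J := (if PySem.Int.mod ((t:Int)+1) 2 = 1 then PySem.List.pyRange ((n:Int)-((t:Int)+1)-1) (-1) (-1)
           else PySem.List.pyRange 0 ((n:Int)-((t:Int)+1)) 1) with hJdef
    have hnd : J.Nodup := by
      rw [hJdef]
      split
      · rw [PySem.List.pyRange_neg_one_eq_reverse]
        exact List.nodup_reverse.mpr (PySem.List.nodup_pyRange_one _ _)
      · exact PySem.List.nodup_pyRange_one _ _
    have hc2 : ((t+1 : Nat) : Int) = (t:Int) + 1 := by push_cast; ring
    have hJb : ∀ j ∈ J, 0 ≤ j ∧ j + ((t+1 : Nat) : Int) < (n:Int) := by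
      intro j hj
      rw [hJdef] at hj
      rw [hc2]
      revert hj
      split
      · intro hj
        rw [PySem.List.mem_pyRange_neg_one] at hj
        omega
      · intro hj
        rw [PySem.List.mem_pyRange_one] at hj
        omega
    have hlenJ : ∀ j ∈ J, (f j.toNat).length = j.toNat + (t+1) := by
      intro j hj
      obtain ⟨hj0, hjlt⟩ := hJb j hj
      have hjn : j.toNat < n := by omega
      have hl := hlen j.toNat hjn
      omega
    obtain ⟨f', hA', hB', hlen'⟩ := pvFoldDiag J hnd n (t+1) c f hJb hlenJ
    rw [hc2] at hB'
    refine ⟨f', c + (J.length : Int), ?_, ?_, ?_⟩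
    · rw [← apply_ite
        (fun (L : List Int) => L.foldl (fun (s : List (List Int) × Int) j => (pvAppendAt s.1 j s.2, s.2 + 1)) ((List.range n).map f, c)),
        hbranch]
      exact hA'
    · exact hB'
    · intro r hr
      have h1 := hlen' r
      have h2 := hlen r hr
      have h3 := hJlem r hr
      by_cases hm : (r:Int) ∈ J
      · rw [if_pos hm] at h1
        have h4 := h3.mp hm
        omega
      · rw [if_neg hm] at h1
        have h4 : ¬ ((r:Int) ≤ (n:Int) - ((t:Int)+1) - 1) := fun hh => hm (h3.mpr hh)
        omega

theorem pvMain (N : Int) (h0 : 0 < N) : pattern6 N = pattern6_alt N := by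
  obtain ⟨n, rfl⟩ : ∃ n : Nat, N = (n:Int) := ⟨N.toNat, by omega⟩
  have hn : 0 < n := by omega
  have hne : ¬ ((n:Int) = 0) := by omega
  have hle : ¬ ((n:Int) ≤ 0) := by omega
  have hcast : ((n-1 : Nat) : Int) = (n:Int) - 1 := by omega
  -- A, first loop
  have e1 : (PySem.List.pyRange 0 ((n:Int)-1) 1).foldl (fun (a : List (List Int)) _ => a ++ [[0]]) [[1]]
      = (List.range n).map (fun r => if r ≤ 0 then pvRowA r else List.replicate 1 0) := by
    rw [pvPhase1, show ((n:Int)-1).toNat = n - 1 from by omega, pvInit1 n hn]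
  -- A, second loop
  have e2 := pvPhase2 n hn (n-1) (le_refl _)
  rw [hcast] at e2
  have e2' : (List.range n).map (fun r => if r ≤ n-1 then pvRowA r else List.replicate ((n-1)+1) 0)
      = (List.range n).map pvRowA := by
    apply List.map_congr_left
    intro r hr
    simp only [List.mem_range] at hr
    have : r ≤ n - 1 := by omega
    simp [this]
  rw [e2', show (2:Int) + ((n:Int)-1) = (n:Int) + 1 from by omega] at e2
  -- third loops
  obtain ⟨f, c, hA3, hB3, hlen⟩ := pvPhase3 n hn (n-1) (le_refl _)
  rw [hcast] at hA3 hB3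
  rw [show ((n:Int)-1) + 1 = (n:Int) from by omega] at hB3
  -- B, allocation and first loop
  have eM : (PySem.List.pyRange 0 (n:Int) 1).map (fun _ => PySem.List.pyRepeat [(0:Int)] (n:Int))
      = (List.range n).map (fun _ => List.replicate n (0:Int)) := by
    rw [PySem.List.pyRange_one, List.map_map]
    simp [Function.comp_def, PySem.List.pyRepeat_singleton, List.map_const']
  have eB1 := pvBDiag n n (le_refl _)
  have eB1' : (List.range n).map (fun r => if r < n then pvPad n (pvRowA r) else List.replicate n 0)
      = (List.range n).map (fun r => pvPad n (pvRowA r)) := by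
    apply List.map_congr_left
    intro r hr
    simp only [List.mem_range] at hr
    simp [hr]
  rw [eB1', show (1:Int) + (n:Int) = (n:Int) + 1 from by omega] at eB1
  -- assemble
  simp only [pattern6, pattern6_alt, if_neg hne, if_neg hle]
  rw [e1, e2, hA3, eM, eB1, hB3]
  have hpad : (List.range n).map (fun r => pvPad n (f r)) = (List.range n).map f := by
    apply List.map_congr_left
    intro r hr
    simp only [List.mem_range] at hr
    apply pvPad_full
    have := hlen r hr
    omega
  rw [hpad]

theorem pvNeg (N : Int) (h0 : N < 0) : pattern6 N = [[1]] := by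
  have h1 : ¬ (N = 0) := by omega
  have h2 : PySem.List.pyRange 0 (N-1) 1 = [] := PySem.List.pyRange_one_eq_nil (by omega)
  simp [pattern6, h1, h2]

theorem pvAltNonpos (N : Int) (h0 : N ≤ 0) : pattern6_alt N = [] := by
  simp [pattern6_alt, h0]

-- ===== VERDICT (by name: the statement is the Claim_ definition above) =====
theorem pattern6_spec : Claim_unchanged_pattern6 := by
  intro N _ hD
  have h0 : 0 ≤ N := by unfold D_pattern6 at hD; omega
  rcases lt_or_eq_of_le h0 with h | h
  · exact pvMain N h
  · have hz : N = 0 := h.symm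
    subst hz
    simp [pattern6, pattern6_alt]

theorem pattern6_changed : Claim_changed_pattern6 := by
  unfold Claim_changed_pattern6; decide

theorem pattern6_tight : Claim_exact_pattern6 := by
  intro N _ hD
  unfold D_pattern6 at hD
  rw [pvNeg N hD, pvAltNonpos N (by omega)]
  simp
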